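-- pv_equiv track=rewrite | github.com/Panchob/Advent-of-Code-2019 | Day18/day18.py | createGraphFromString
-- ===== SOURCE A (Python) =====
-- def createGraphFromString(string):
--     graph = []
--     line = []
--     x, y = 0, 0
--     for character in string:
--         if character == '\n':
--             graph.append(line[:])
--             line = []
--         else:
--             line.append(character)
--
--     return graph
-- ===== SOURCE B (Python) =====
-- def createGraphFromString(string):
--     return [list(line) for line in string.split('\n')[:-1]]
-- ===== Notes on version B (the rewrite author's own statement) =====
-- stated objective: idiomatic
-- what changed: Replaces the character-by-character state machine (manual line accumulator flushed at each newline) with str.split on the newline character, dropping the last piece with [:-1] (which reproduces A's discarding of the unterminated trailing line) and a list() comprehension per line.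
import Mathlib
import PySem

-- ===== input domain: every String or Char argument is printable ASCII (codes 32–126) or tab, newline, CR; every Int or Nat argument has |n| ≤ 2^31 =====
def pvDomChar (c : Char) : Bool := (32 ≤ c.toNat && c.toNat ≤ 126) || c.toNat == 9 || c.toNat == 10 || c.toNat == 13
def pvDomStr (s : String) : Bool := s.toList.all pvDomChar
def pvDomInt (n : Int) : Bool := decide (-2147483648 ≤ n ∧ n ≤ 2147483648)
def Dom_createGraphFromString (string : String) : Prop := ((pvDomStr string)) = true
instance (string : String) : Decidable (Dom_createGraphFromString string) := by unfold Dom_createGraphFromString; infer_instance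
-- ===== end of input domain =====

-- B replaces A's per-character state machine by split('\n')[:-1] + a list() comprehension (idiomatic; return value only).

-- ===== PORT A =====
-- A: iterate over the characters, flushing the current line at each '\n'; the trailing unterminated line is dropped.
def createGraphFromString (string : String) : List (List String) :=
  (string.toList.foldl
    (fun (st : List (List String) × List String) character =>
      if character = '\n' then (st.1 ++ [st.2], [])
      else (st.1, st.2 ++ [toString character]))
    ([], [])).1

-- ===== PORT B =====
-- B: string.split('\n')[:-1], each remaining line turned into its list of characters.
def createGraphFromString_alt (string : String) : List (List String) :=
  (((PySem.Str.split? string "\n").getD []).dropLast).map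
    (fun line => line.toList.map (fun c => toString c))

-- ===== PRECONDITION & SPEC =====
def Spec_createGraphFromString (string : String) (out : List (List String)) : Prop := out = createGraphFromString_alt string
instance (string : String) (out : List (List String)) : Decidable (Spec_createGraphFromString string out) := by unfold Spec_createGraphFromString; infer_instance

-- ===== CLAIM (what is proved, stated in full; the proofs are below) =====
def Claim_equal_createGraphFromString : Prop := ∀ (string : String), Dom_createGraphFromString string → Spec_createGraphFromString string (createGraphFromString string)

-- ===== LEMMAS AND PROOFS =====

/-- Reference line-splitter at the character level: the pieces of `l` between `'\n'`s,
with `cur` the (in-order) partial current line. -/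
def clines : List Char → List Char → List (List Char)
  | [], cur => [cur]
  | c :: r, cur => if c = '\n' then cur :: clines r [] else clines r (cur ++ [c])

theorem clines_ne_nil (l : List Char) : ∀ cur, clines l cur ≠ [] := by
  induction l with
  | nil => intro cur; simp [clines]
  | cons c r ih =>
    intro cur
    simp only [clines]
    split
    · simp
    · exact ih _

theorem go_spec (l : List Char) : ∀ (fuel : Nat) (cur : List Char) (acc : List (List Char))
    (_ : l.length < fuel),
    PySem.Chars.splitOn.go ['\n'] fuel l cur acc = acc.reverse ++ clines l cur.reverse := by
  induction l with
  | nil =>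
    intro fuel cur acc _
    cases fuel <;> simp [PySem.Chars.splitOn.go, clines]
  | cons c r ih =>
    intro fuel cur acc h
    cases fuel with
    | zero => omega
    | succ fuel =>
      simp only [PySem.Chars.splitOn.go]
      by_cases hc : c = '\n'
      · subst hc
        have hpre : List.isPrefixOf ['\n'] ('\n' :: r) = true := by
          simp [List.isPrefixOf]
        rw [if_pos hpre]
        simp only [List.length_cons] at h
        simp only [List.length_cons, List.length_nil, List.drop_succ_cons, List.drop_zero]
        rw [ih fuel [] (cur.reverse :: acc) (by omega)]
        simp [clines]
      · have hpre : List.isPrefixOf ['\n'] (c :: r) = false := by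
          simp only [List.isPrefixOf, Bool.and_eq_false_iff, beq_eq_false_iff_ne, ne_eq]
          exact Or.inl fun h => hc h.symm
        rw [if_neg (by simp [hpre])]
        simp only [List.length_cons] at h
        rw [ih fuel (c :: cur) acc (by omega)]
        simp [clines, hc]

theorem splitOn_newline (cs : List Char) :
    PySem.Chars.splitOn cs ['\n'] = clines cs [] := by
  unfold PySem.Chars.splitOn
  rw [go_spec cs (cs.length + 1) [] [] (by omega)]
  simp

theorem foldA_spec (l : List Char) : ∀ (G : List (List String)) (R : List Char),
    (l.foldl
      (fun (st : List (List String) × List String) character =>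
        if character = '\n' then (st.1 ++ [st.2], [])
        else (st.1, st.2 ++ [toString character]))
      (G, R.map (fun c => toString c))).1
    = G ++ ((clines l R).dropLast).map (fun p => p.map (fun c => toString c)) := by
  induction l with
  | nil => intro G R; simp [clines]
  | cons c r ih =>
    intro G R
    by_cases hc : c = '\n'
    · subst hc
      simp only [List.foldl_cons, clines, reduceIte]
      have := ih (G ++ [R.map (fun c => toString c)]) []
      simp only [List.map_nil] at this
      rw [this]
      rw [List.dropLast_cons_of_ne_nil (clines_ne_nil r [])]
      simp
    · simp only [List.foldl_cons, clines, hc, if_false]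
      have : (R.map (fun c => toString c)) ++ [toString c]
          = (R ++ [c]).map (fun c => toString c) := by simp
      rw [this, ih G (R ++ [c])]

-- ===== VERDICT (by name: the statement is the Claim_ definition above) =====
theorem createGraphFromString_spec : Claim_equal_createGraphFromString := by
  intro s _
  unfold Spec_createGraphFromString createGraphFromString createGraphFromString_alt
  have hsplit : PySem.Str.split? s "\n"
      = some ((PySem.Chars.splitOn s.toList ['\n']).map String.ofList) := by
    simp [PySem.Str.split?, PySem.Chars.split?]
  rw [hsplit]
  have := foldA_spec s.toList [] []
  simp only [List.map_nil] at this
  rw [this, splitOn_newline]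
  simp [Function.comp_def]
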